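-- pv_equiv track=rewrite | github.com/deltex6/Google-Bookmark-Page | lowercase_html_tags.py | remove_empty_dl
-- ===== SOURCE A (Python) =====
-- def remove_empty_dl(lines):
--     i = 0
--     while i < len(lines):
--         line = lines[i].lower().strip()
--
--         # Jeśli znaleźliśmy otwarcie dl
--         if line == '<dl><p>':
--             # Szukaj następnej niepustej linii
--             next_i = i + 1
--             while next_i < len(lines) and lines[next_i].strip() == '':
--                 next_i += 1
--
--             # Jeśli następna niepusta linia to zamykający </dl><p>, usuń obie linie
--             if next_i < len(lines) and lines[next_i].lower().strip() == '</dl><p>':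
--                 # Usuń wszystkie linie między dl i /dl, włącznie z nimi
--                 for _ in range(next_i - i + 1):
--                     lines.pop(i)
--                 continue
--
--         # Usuń puste znaczniki <p>
--         if line == '<p>' or line == '</p>':
--             lines.pop(i)
--             continue
--
--         i += 1
--     return lines
-- ===== SOURCE B (Python) =====
-- def remove_empty_dl(lines):
--     # Single forward pass building a new output list (A mutates its argument
--     # in place; B leaves it untouched and returns a fresh list of equal value).
--     out = []
--     n = len(lines)
--     i = 0
--     while i < n:
--         s = lines[i].lower().strip()
--         if s == '<dl><p>':
--             j = i + 1
--             while j < n and lines[j].strip() == '':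
--                 j += 1
--             if j < n and lines[j].lower().strip() == '</dl><p>':
--                 i = j + 1
--                 continue
--         if s != '<p>' and s != '</p>':
--             out.append(lines[i])
--         i += 1
--     return out
-- ===== Notes on version B (the rewrite author's own statement) =====
-- stated objective: alternative
-- what changed: B replaces A's in-place repeated list.pop(i) deletions by a single forward pass that appends kept lines to a fresh output list and jumps the index past removed blocks; B does not mutate its argument (the return value is identical), and measured runtimes on random inputs are similar.
import Mathlib
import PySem

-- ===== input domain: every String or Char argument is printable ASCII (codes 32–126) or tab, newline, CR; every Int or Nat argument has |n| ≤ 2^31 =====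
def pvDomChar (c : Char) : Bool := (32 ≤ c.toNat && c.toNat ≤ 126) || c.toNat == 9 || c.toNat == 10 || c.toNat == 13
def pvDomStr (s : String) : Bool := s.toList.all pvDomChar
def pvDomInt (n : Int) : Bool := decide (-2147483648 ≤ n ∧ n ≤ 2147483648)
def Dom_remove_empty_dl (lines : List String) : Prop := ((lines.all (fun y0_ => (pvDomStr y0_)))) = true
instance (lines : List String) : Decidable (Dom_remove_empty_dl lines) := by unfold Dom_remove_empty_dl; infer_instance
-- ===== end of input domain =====

-- B replaces A's in-place repeated list.pop(i) deletions by a single forward pass that appends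
-- kept lines to a fresh output list; the return values are identical (A mutates its argument in
-- place, B does not — the equivalence proved here is about the return value only).


-- ===== PORT A =====
-- lines[i].lower().strip()
def pvStripLower (x : String) : String := PySem.Str.strip (PySem.Str.lower x)

-- inner while: "while next_i < len(lines) and lines[next_i].strip() == '': next_i += 1"
def pvNextNonblankA (lines : List String) (ni : Nat) : Nat :=
  if h : ni < lines.length ∧ PySem.Str.strip (lines.getD ni "") = "" then
    pvNextNonblankA lines (ni + 1)
  else ni
termination_by lines.length - ni
decreasing_by omega

-- "for _ in range(n): lines.pop(i)"
def pvPopN (lines : List String) (i : Nat) : Nat → List String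
  | 0 => lines
  | n + 1 => pvPopN (lines.eraseIdx i) i n

-- termination helper for the pop branch (cited by pvLoopA's decreasing_by)
theorem pvPopN_length_le (i : Nat) : ∀ (n : Nat) (l : List String), (pvPopN l i n).length ≤ l.length := by
  intro n
  induction n with
  | zero => intro l; simp [pvPopN]
  | succ m ih =>
      intro l
      calc (pvPopN (l.eraseIdx i) i m).length ≤ (l.eraseIdx i).length := ih _
        _ ≤ l.length := by rw [List.length_eraseIdx]; split <;> omega

theorem pvPopN_succ_lt (l : List String) (i m : Nat) (h : i < l.length) :
    (pvPopN l i (m + 1)).length < l.length := by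
  show (pvPopN (l.eraseIdx i) i m).length < l.length
  calc (pvPopN (l.eraseIdx i) i m).length ≤ (l.eraseIdx i).length := pvPopN_length_le i m _
    _ < l.length := by rw [List.length_eraseIdx]; split <;> omega

-- outer while of A, state = (current mutated list, i)
def pvLoopA (lines : List String) (i : Nat) : List String :=
  if h : i < lines.length then
    let line := pvStripLower (lines.getD i "")
    if line = "<dl><p>" then
      let next_i := pvNextNonblankA lines (i + 1)
      if next_i < lines.length ∧ pvStripLower (lines.getD next_i "") = "</dl><p>" then
        pvLoopA (pvPopN lines i (next_i - i + 1)) i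
      else if line = "<p>" ∨ line = "</p>" then pvLoopA (lines.eraseIdx i) i
      else pvLoopA lines (i + 1)
    else if line = "<p>" ∨ line = "</p>" then pvLoopA (lines.eraseIdx i) i
    else pvLoopA lines (i + 1)
  else lines
termination_by lines.length - i
decreasing_by
  · have h1 := pvPopN_succ_lt lines i (pvNextNonblankA lines (i + 1) - i) h
    omega
  · rw [List.length_eraseIdx]; split <;> omega
  · omega
  · rw [List.length_eraseIdx]; split <;> omega
  · omega

def remove_empty_dl (lines : List String) : List String := pvLoopA lines 0

-- ===== PORT B =====
-- lookahead over blank lines: "while j < n and lines[j].strip() == '': j += 1"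
def pvNextNonblankB (lines : List String) (j : Nat) : Nat :=
  if h : j < lines.length ∧ PySem.Str.strip (lines.getD j "") = "" then
    pvNextNonblankB lines (j + 1)
  else j
termination_by lines.length - j
decreasing_by omega

-- termination helper for the skip branch (cited by pvLoopB's decreasing_by)
theorem pvNextNonblankB_ge (lines : List String) : ∀ j, j ≤ pvNextNonblankB lines j := by
  intro j
  induction hk : lines.length - j using Nat.strong_induction_on generalizing j with
  | _ k ih =>
    rw [pvNextNonblankB]
    split
    · next hc =>
        have := ih (lines.length - (j + 1)) (by omega) (j + 1) rfl
        omega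
    · omega

-- single forward pass of B: i scans the (immutable) input, out accumulates kept lines
def pvLoopB (lines : List String) (i : Nat) (out : List String) : List String :=
  if h : i < lines.length then
    let s := pvStripLower (lines.getD i "")
    if s = "<dl><p>" then
      let j := pvNextNonblankB lines (i + 1)
      if j < lines.length ∧ pvStripLower (lines.getD j "") = "</dl><p>" then
        pvLoopB lines (j + 1) out
      else pvLoopB lines (i + 1) (if s ≠ "<p>" ∧ s ≠ "</p>" then out ++ [lines.getD i ""] else out)
    else pvLoopB lines (i + 1) (if s ≠ "<p>" ∧ s ≠ "</p>" then out ++ [lines.getD i ""] else out)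
  else out
termination_by lines.length - i
decreasing_by
  · have := pvNextNonblankB_ge lines (i + 1)
    omega
  · omega
  · omega

def remove_empty_dl_alt (lines : List String) : List String := pvLoopB lines 0 []

-- ===== PRECONDITION & SPEC =====
def Spec_remove_empty_dl (lines : List String) (out : List String) : Prop := out = remove_empty_dl_alt lines
instance (lines : List String) (out : List String) : Decidable (Spec_remove_empty_dl lines out) := by unfold Spec_remove_empty_dl; infer_instance

-- ===== CLAIM (what is proved, stated in full; the proofs are below) =====
def Claim_equal_remove_empty_dl : Prop := ∀ (lines : List String), Dom_remove_empty_dl lines → Spec_remove_empty_dl lines (remove_empty_dl lines)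

-- ===== LEMMAS AND PROOFS =====

-- the element of A's current list at offset out.length + t is the original line at j + t
theorem pv_getD_shift (out lines : List String) (j t : Nat) :
    (out ++ lines.drop j).getD (out.length + t) "" = lines.getD (j + t) "" := by
  simp [List.getD, List.getElem?_append_right, List.getElem?_drop]

-- the two blank-skipping scans agree modulo the frame shift
theorem pv_scan_eq (lines out : List String) :
    ∀ (k j m : Nat), lines.length - (j + m) ≤ k →
      pvNextNonblankA (out ++ lines.drop j) (out.length + m) =
        out.length + (pvNextNonblankB lines (j + m) - j) := by
  intro k
  induction k with
  | zero =>
    intro j m hk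
    rw [pvNextNonblankA, pvNextNonblankB]
    rw [dif_neg (by simp; omega), dif_neg (by simp; omega)]
    omega
  | succ k ih =>
    intro j m hk
    have hlen : (out ++ lines.drop j).length = out.length + (lines.length - j) := by simp
    have hget := pv_getD_shift out lines j m
    by_cases hc : j + m < lines.length ∧ PySem.Str.strip (lines.getD (j + m) "") = ""
    · rw [pvNextNonblankA, pvNextNonblankB,
        dif_pos (show _ ∧ _ from ⟨by omega, by rw [hget]; exact hc.2⟩), dif_pos hc]
      have := ih j (m + 1) (by omega)
      rw [← Nat.add_assoc, ← Nat.add_assoc] at this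
      exact this
    · rw [pvNextNonblankA, pvNextNonblankB,
        dif_neg (fun h => hc ⟨by omega, by rw [← hget]; exact h.2⟩), dif_neg hc]
      omega

-- erasing at the junction of kept prefix and remaining suffix drops the suffix head
theorem pv_eraseIdx_mid (out t : List String) (x : String) :
    (out ++ (x :: t)).eraseIdx out.length = out ++ t := by
  induction out with
  | nil => simp
  | cons a as ih => simpa using ih

-- popping n elements at position out.length just drops n more original lines
theorem pv_popN_drop (i : Nat) : ∀ (n : Nat) (out lines : List String) (j : Nat), i = out.length →
    j + n ≤ lines.length →
    pvPopN (out ++ lines.drop j) i n = out ++ lines.drop (j + n) := by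
  intro n
  induction n with
  | zero => intro out lines j hi hj; simp [pvPopN]
  | succ m ih =>
    intro out lines j hi hj
    show pvPopN ((out ++ lines.drop j).eraseIdx i) i m = _
    have hj' : j < lines.length := by omega
    have hdrop : lines.drop j = lines[j] :: lines.drop (j + 1) := List.drop_eq_getElem_cons hj'
    have herase : (out ++ lines.drop j).eraseIdx i = out ++ lines.drop (j + 1) := by
      rw [hdrop, hi]
      exact pv_eraseIdx_mid out _ _
    rw [herase, ih out lines (j + 1) hi (by omega)]
    ring_nf

-- invariant: A's mutated list is always (kept lines so far) ++ (unprocessed original suffix),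
-- and A's index equals the number of kept lines
theorem pv_main (lines : List String) :
    ∀ (k j : Nat) (out : List String), lines.length - j ≤ k →
      pvLoopA (out ++ lines.drop j) out.length = pvLoopB lines j out := by
  intro k
  induction k with
  | zero =>
    intro j out hk
    rw [pvLoopA, pvLoopB, dif_neg (by simp; omega), dif_neg (by omega)]
    simp [List.drop_eq_nil_of_le (show lines.length ≤ j by omega)]
  | succ k ih =>
    intro j out hk
    by_cases hj : j < lines.length
    case neg =>
      rw [pvLoopA, pvLoopB, dif_neg (by simp; omega), dif_neg hj]
      simp [List.drop_eq_nil_of_le (show lines.length ≤ j by omega)]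
    case pos =>
      have hlen : (out ++ lines.drop j).length = out.length + (lines.length - j) := by simp
      have hcur : (out ++ lines.drop j).getD out.length "" = lines.getD j "" := by
        simpa using pv_getD_shift out lines j 0
      have hsplit : out ++ lines.drop j = (out ++ [lines.getD j ""]) ++ lines.drop (j + 1) := by
        rw [List.drop_eq_getElem_cons hj, List.getD_eq_getElem _ _ hj]
        simp
      rw [pvLoopA, pvLoopB,
        dif_pos (show out.length < (out ++ lines.drop j).length by omega), dif_pos hj]
      simp only [hcur]
      by_cases hs : pvStripLower (lines.getD j "") = "<dl><p>"
      · rw [if_pos hs, if_pos hs]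
        have hscan := pv_scan_eq lines out (lines.length - (j + 1)) j 1 (Nat.le_refl _)
        set nb := pvNextNonblankB lines (j + 1) with hnbdef
        have hnbge : j + 1 ≤ nb := pvNextNonblankB_ge lines (j + 1)
        simp only [hscan]
        have hget2 : (out ++ lines.drop j).getD (out.length + (nb - j)) ""
            = lines.getD nb "" := by
          rw [pv_getD_shift]
          congr 1
          omega
        by_cases hfound : nb < lines.length ∧
            pvStripLower (lines.getD nb "") = "</dl><p>"
        · have hfound1 := hfound.1
          rw [if_pos (show _ ∧ _ from ⟨by omega, by rw [hget2]; exact hfound.2⟩), if_pos hfound]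
          have harith : out.length + (nb - j) - out.length + 1 = nb - j + 1 := by omega
          have harith2 : j + (nb - j + 1) = nb + 1 := by omega
          have hpop := pv_popN_drop out.length (nb - j + 1) out lines j rfl (by omega)
          rw [harith2] at hpop
          rw [harith, hpop]
          exact ih (nb + 1) out (by omega)
        · rw [if_neg (fun h => hfound ⟨by omega, by rw [← hget2]; exact h.2⟩), if_neg hfound]
          have hnp : ¬(pvStripLower (lines.getD j "") = "<p>" ∨ pvStripLower (lines.getD j "") = "</p>") := by
            rw [hs]; decide
          rw [if_neg hnp, if_pos (show pvStripLower (lines.getD j "") ≠ "<p>" ∧ pvStripLower (lines.getD j "") ≠ "</p>" from ⟨fun h => hnp (Or.inl h), fun h => hnp (Or.inr h)⟩)]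
          rw [hsplit, show out.length + 1 = (out ++ [lines.getD j ""]).length by simp]
          exact ih (j + 1) (out ++ [lines.getD j ""]) (by omega)
      · rw [if_neg hs, if_neg hs]
        by_cases hp : pvStripLower (lines.getD j "") = "<p>" ∨ pvStripLower (lines.getD j "") = "</p>"
        · rw [if_pos hp, if_neg (show ¬(pvStripLower (lines.getD j "") ≠ "<p>" ∧ pvStripLower (lines.getD j "") ≠ "</p>") from fun hc => hp.elim hc.1 hc.2)]
          have herase : (out ++ lines.drop j).eraseIdx out.length = out ++ lines.drop (j + 1) := by
            rw [List.drop_eq_getElem_cons hj]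
            exact pv_eraseIdx_mid out _ _
          rw [herase]
          exact ih (j + 1) out (by omega)
        · rw [if_neg hp, if_pos (show pvStripLower (lines.getD j "") ≠ "<p>" ∧ pvStripLower (lines.getD j "") ≠ "</p>" from ⟨fun h => hp (Or.inl h), fun h => hp (Or.inr h)⟩)]
          rw [hsplit, show out.length + 1 = (out ++ [lines.getD j ""]).length by simp]
          exact ih (j + 1) (out ++ [lines.getD j ""]) (by omega)

-- ===== VERDICT (by name: the statement is the Claim_ definition above) =====
theorem remove_empty_dl_spec : Claim_equal_remove_empty_dl := by
  intro lines _
  unfold Spec_remove_empty_dl remove_empty_dl remove_empty_dl_alt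
  have := pv_main lines lines.length 0 [] (by omega)
  simpa using this
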